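-- pv_equiv track=rewrite | github.com/mariajvieira/feup-ia-CakeSortPuzzle | src/views/game_view.py | _reorganize_plate
-- ===== SOURCE A (Python) =====
-- def _reorganize_plate(plate):
--     """Reorganiza as fatias do prato para que fatias do mesmo tipo fiquem em posições consecutivas.
--
--     Args:
--         plate (list): Lista representando o prato com suas fatias.
--
--     Returns:
--         list: Lista reorganizada com fatias do mesmo tipo em posições consecutivas.
--     """
--     if not plate:
--         return plate
--
--     # Cria um dicionário para agrupar fatias por tipo
--     slices_by_type = {}
--     for slice_type in plate:
--         if slice_type is not None:
--             if slice_type not in slices_by_type: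
--                 slices_by_type[slice_type] = 0
--             slices_by_type[slice_type] += 1
--
--     # Cria um novo prato com as fatias agrupadas
--     reorganized_plate = [None] * 8  # Um prato tem 8 posições
--     current_position = 0
--
--     # Adiciona cada tipo de fatia em posições consecutivas
--     for slice_type, count in slices_by_type.items():
--         for i in range(count):
--             if current_position < 8:  # Garante que não exceda o tamanho do prato
--                 reorganized_plate[current_position] = slice_type
--                 current_position += 1
--
--     return reorganized_plate
-- ===== SOURCE B (Python) =====
-- def _reorganize_plate(plate):
--     """Group same-type slices consecutively: dedup types in first-appearance
--     order, concatenate the per-type filtered sublists, truncate/pad to 8."""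
--     if not plate:
--         return plate
--     order = []
--     for s in plate:
--         if s is not None and s not in order:
--             order.append(s)
--     body = []
--     for t in order:
--         body += [s for s in plate if s == t]
--     body = body[:8]
--     return body + [None] * (8 - len(body))
-- ===== Notes on version B (the rewrite author's own statement) =====
-- stated objective: simpler
-- what changed: Replaces the count-dict-then-expand-into-a-preallocated-8-slot-array construction by an order-preserving dedup of types followed by concatenating per-type filters of the plate, then one truncate-to-8 and pad-with-None step; no counts and no positional writes are maintained.
import Mathlib
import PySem

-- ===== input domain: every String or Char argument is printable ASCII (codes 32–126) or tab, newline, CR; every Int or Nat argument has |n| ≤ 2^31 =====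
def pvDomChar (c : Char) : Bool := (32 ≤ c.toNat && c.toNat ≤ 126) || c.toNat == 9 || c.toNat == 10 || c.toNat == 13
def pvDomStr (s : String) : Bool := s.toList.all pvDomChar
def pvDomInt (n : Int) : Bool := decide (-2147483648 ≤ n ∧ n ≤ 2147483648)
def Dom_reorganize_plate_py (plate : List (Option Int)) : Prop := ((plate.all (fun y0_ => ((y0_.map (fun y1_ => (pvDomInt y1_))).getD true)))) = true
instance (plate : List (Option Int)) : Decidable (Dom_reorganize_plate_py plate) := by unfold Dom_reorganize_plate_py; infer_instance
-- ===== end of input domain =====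

-- B replaces A's count-dict + positional writes into a preallocated 8-slot array by
-- dedup-of-types + concatenation of per-type filters, then one truncate/pad-to-8 step (objective: simpler).

-- ===== PORT A =====
-- counting step: 'if slice_type not in d: d[slice_type] = 0; d[slice_type] += 1'
def pvAStep (d : PySem.Dict Int Int) (x : Option Int) : PySem.Dict Int Int :=
  match x with
  | none => d
  | some v =>
    let d := if d.contains v then d else d.insert v 0
    d.insert v (d.getD v 0 + 1)

-- one body iteration: 'if current_position < 8: reorganized_plate[current_position] = y; current_position += 1'
-- (list assignment at an in-range index is List.set at the index; exact here since 0 ≤ current_position < 8)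
def pvWrite (st : List (Option Int) × Int) (y : Option Int) : List (Option Int) × Int :=
  if st.2 < 8 then (st.1.set st.2.toNat y, st.2 + 1) else st

def reorganize_plate_py (plate : List (Option Int)) : List (Option Int) :=
  if plate = [] then plate
  else
    let slices_by_type : PySem.Dict Int Int := plate.foldl pvAStep PySem.Dict.empty
    let res := slices_by_type.items.foldl
      (fun st p => (PySem.List.pyRange 0 p.2 1).foldl (fun st _ => pvWrite st (some p.1)) st)
      (List.replicate 8 none, 0)
    res.1

-- ===== PORT B =====
def pvOrderStep (acc : List Int) (x : Option Int) : List Int :=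
  match x with
  | none => acc
  | some v => if acc.contains v then acc else acc ++ [v]

def reorganize_plate_py_alt (plate : List (Option Int)) : List (Option Int) :=
  if plate = [] then plate
  else
    let order : List Int := plate.foldl pvOrderStep []
    let body : List (Option Int) :=
      order.foldl (fun acc t => acc ++ plate.filter (fun s => s == some t)) []
    let body8 := PySem.List.slice body none (some 8)
    body8 ++ List.replicate (8 - body8.length) none

-- ===== PRECONDITION & SPEC =====
def Spec_reorganize_plate_py (plate : List (Option Int)) (out : List (Option Int)) : Prop := out = reorganize_plate_py_alt plate
instance (plate : List (Option Int)) (out : List (Option Int)) : Decidable (Spec_reorganize_plate_py plate out) := by unfold Spec_reorganize_plate_py; infer_instance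

-- ===== CLAIM (what is proved, stated in full; the proofs are below) =====
def Claim_equal_reorganize_plate_py : Prop := ∀ (plate : List (Option Int)), Dom_reorganize_plate_py plate → Spec_reorganize_plate_py plate (reorganize_plate_py plate)

-- ===== LEMMAS AND PROOFS =====

-- skipping None: a foldl over the plate whose step ignores none is a foldl over the non-None values
theorem foldl_skip_none {β : Type} (f : β → Int → β) :
    ∀ (plate : List (Option Int)) (b : β),
      plate.foldl (fun b x => match x with | none => b | some v => f b v) b
        = (plate.filterMap id).foldl f b := by
  intro plate
  induction plate with
  | nil => intro b; rfl
  | cons x xs ih =>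
    intro b
    cases x <;> simp [List.foldl_cons, ih]

-- insert twice at the same key = insert once (overwrite in place)
theorem insert_insert_self (d : PySem.Dict Int Int) (k v w : Int) :
    (d.insert k v).insert k w = d.insert k w := by
  apply PySem.Dict.ext
  by_cases h : d.contains k
  · rw [PySem.Dict.items_insert_of_contains _ _ (by rw [PySem.Dict.contains_insert]; simp),
        PySem.Dict.items_insert_of_contains _ _ h,
        PySem.Dict.items_insert_of_contains _ _ h, List.map_map]
    apply List.map_congr_left
    intro p _
    by_cases hp : p.1 = k <;> simp [hp]
  · have h' : d.contains k = false := by simpa using h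
    rw [PySem.Dict.items_insert_of_contains _ _ (by rw [PySem.Dict.contains_insert]; simp),
        PySem.Dict.items_insert_of_not_contains _ _ h',
        PySem.Dict.items_insert_of_not_contains _ _ h', List.map_append]
    congr 1
    conv_rhs => rw [← List.map_id d.items]
    apply List.map_congr_left
    intro p hp
    have hne : (p.1 == k) = false := by
      by_contra hcon
      have hk : p.1 = k := by simpa using hcon
      apply h
      apply (PySem.Dict.contains_iff_mem_keys _ _).mpr
      have hm := List.mem_map_of_mem (f := Prod.fst) hp
      rw [hk] at hm
      simpa [PySem.Dict.keys] using hm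
    simp [hne]
    simp

-- A's counting step is the plain counting insert
theorem pvAStep_eq (d : PySem.Dict Int Int) (v : Int) :
    pvAStep d (some v) = d.insert v (d.getD v 0 + 1) := by
  unfold pvAStep
  by_cases h : d.contains v
  · simp [h]
  · simp only [h, Bool.false_eq_true, if_false]
    rw [PySem.Dict.getD_insert_self, insert_insert_self,
        PySem.Dict.getD_of_not_contains _ _ (by simpa using h)]

-- A's dict is Counter(non-None values)
theorem dict_eq_counter (plate : List (Option Int)) :
    plate.foldl pvAStep PySem.Dict.empty = PySem.Dict.counter (plate.filterMap id) := by
  have h1 : plate.foldl pvAStep (PySem.Dict.empty : PySem.Dict Int Int)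
      = plate.foldl (fun (d : PySem.Dict Int Int) x => match x with | none => d | some v => d.insert v (d.getD v 0 + 1)) PySem.Dict.empty := by
    apply PySem.List.foldl_congr_mem
    intro d x _
    cases x with
    | none => rfl
    | some v => exact pvAStep_eq d v
  rw [h1, foldl_skip_none (fun (d : PySem.Dict Int Int) v => d.insert v (d.getD v 0 + 1))]
  exact PySem.Dict.foldl_insert_getD_add_one_eq_counter _

-- B's order list is set(non-None values) in first-appearance order
theorem order_eq_ofList (plate : List (Option Int)) :
    plate.foldl pvOrderStep [] = PySem.Set.ofList (plate.filterMap id) := by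
  have h1 : plate.foldl pvOrderStep []
      = plate.foldl (fun acc x => match x with | none => acc | some v => PySem.Set.add acc v) ([] : List Int) := by
    apply PySem.List.foldl_congr_mem
    intro acc x _
    cases x with
    | none => rfl
    | some v =>
      show (if acc.contains v then acc else acc ++ [v]) = PySem.Set.add acc v
      rw [PySem.Set.add_eq_ite]
      simp
  rw [h1, foldl_skip_none (fun acc v => PySem.Set.add acc v)]
  rw [PySem.Set.ofList_eq_foldl]

-- filtering the plate for one type yields that type repeated count-many times
theorem filter_eq_replicate (t : Int) :
    ∀ (plate : List (Option Int)),
      plate.filter (fun s => s == some t) = List.replicate ((plate.filterMap id).count t) (some t) := by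
  intro plate
  induction plate with
  | nil => rfl
  | cons x xs ih =>
    cases x with
    | none => simpa using ih
    | some v =>
      by_cases h : v = t
      · subst h
        simp [ih, List.replicate_succ]
      · simp [ih, h]

-- a foldl that appends per element is the flatMap
theorem foldl_append_flatMap {α β : Type} (f : α → List β) :
    ∀ (l : List α) (init : List β), l.foldl (fun acc x => acc ++ f x) init = init ++ l.flatMap f := by
  intro l
  induction l with
  | nil => simp
  | cons x xs ih => intro init; simp [List.foldl_cons, ih, List.flatMap_cons]

-- a foldl whose step ignores the element only depends on the length
theorem foldl_const_length {α α' β : Type} (f : β → β) (l : List α) (l' : List α')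
    (h : l.length = l'.length) (b : β) :
    l.foldl (fun b _ => f b) b = l'.foldl (fun b _ => f b) b := by
  induction l generalizing l' b with
  | nil => cases l' with
    | nil => rfl
    | cons _ _ => simp at h
  | cons x xs ih =>
    cases l' with
    | nil => simp at h
    | cons y ys => simp at h; simp [List.foldl_cons, ih ys h]

-- after the plate is full nothing changes
theorem foldl_pvWrite_full (xs : List (Option Int)) (l : List (Option Int)) (p : Int)
    (h : ¬ p < 8) : xs.foldl pvWrite (l, p) = (l, p) := by
  induction xs with
  | nil => rfl
  | cons x xs ih => simp [List.foldl_cons, pvWrite, h, ih]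

-- main fill invariant for A's positional-write loop
theorem fill_invariant (xs : List (Option Int)) :
    ∀ (done : List (Option Int)), done.length ≤ 8 →
      (xs.foldl pvWrite (done ++ List.replicate (8 - done.length) none, (done.length : Int))).1
        = done ++ xs.take (8 - done.length) ++ List.replicate (8 - done.length - xs.length) none := by
  induction xs with
  | nil => intro done h; simp
  | cons x xs ih =>
    intro done h
    by_cases hlt : done.length < 8
    · have hset : (done ++ List.replicate (8 - done.length) none).set done.length x
          = (done ++ [x]) ++ List.replicate (8 - (done ++ [x]).length) none := by
        have hrep : List.replicate (8 - done.length) (none : Option Int)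
            = none :: List.replicate (8 - done.length - 1) none := by
          rw [← List.replicate_succ]
          congr 1
          omega
        have hlen : 8 - (done ++ [x]).length = 8 - done.length - 1 := by simp; omega
        rw [hlen, hrep, List.set_append_right _ _ (le_refl _), Nat.sub_self, List.set_cons_zero]
        simp
      have hstep : pvWrite (done ++ List.replicate (8 - done.length) none, (done.length : Int)) x
          = ((done ++ [x]) ++ List.replicate (8 - (done ++ [x]).length) none, ((done ++ [x]).length : Int)) := by
        simp only [pvWrite]
        rw [if_pos (by exact_mod_cast hlt)]
        simp [hset]
      rw [List.foldl_cons, hstep, ih (done ++ [x]) (by simp; omega)]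
      have e1 : 8 - (done ++ [x]).length = 7 - done.length := by simp
      have e2 : 8 - done.length = (7 - done.length) + 1 := by omega
      rw [e1, e2, List.take_succ_cons]
      have e3 : 7 - done.length + 1 - (x :: xs).length = 7 - done.length - xs.length := by
        simp
      rw [e3]
      simp
    · have h8 : done.length = 8 := by omega
      rw [List.foldl_cons]
      simp only [pvWrite]
      rw [if_neg (by exact_mod_cast hlt)]
      rw [foldl_pvWrite_full _ _ _ (by exact_mod_cast hlt)]
      simp [h8]

-- A's nested loop over items is one pass of pvWrite over the expansion
theorem items_loop_eq (ps : List (Int × Int)) :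
    ∀ (st : List (Option Int) × Int),
      ps.foldl (fun st p => (PySem.List.pyRange 0 p.2 1).foldl (fun st _ => pvWrite st (some p.1)) st) st
        = (ps.flatMap (fun p => List.replicate p.2.toNat (some p.1))).foldl pvWrite st := by
  induction ps with
  | nil => intro st; rfl
  | cons p ps ih =>
    intro st
    rw [List.foldl_cons, List.flatMap_cons, List.foldl_append, ih]
    congr 1
    rw [foldl_const_length (fun st => pvWrite st (some p.1)) (PySem.List.pyRange 0 p.2 1)
        (List.replicate p.2.toNat (some p.1)) (by simp [PySem.List.length_pyRange_one]) st]
    clear ih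
    induction p.2.toNat generalizing st with
    | zero => rfl
    | succ n ihn => simp [List.replicate_succ, List.foldl_cons, ihn]

-- the common normal form of both programs on a nonempty plate
theorem both_eq_normal (plate : List (Option Int)) (hne : plate ≠ []) :
    reorganize_plate_py plate = reorganize_plate_py_alt plate := by
  set vals := plate.filterMap id with hvals
  set body : List (Option Int) :=
    (PySem.Set.ofList vals).flatMap (fun t => List.replicate (vals.count t) (some t)) with hbody
  have hA : reorganize_plate_py plate = body.take 8 ++ List.replicate (8 - body.length) none := by
    unfold reorganize_plate_py
    rw [if_neg hne]
    simp only [dict_eq_counter, PySem.Dict.items_counter, items_loop_eq, List.flatMap_map]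
    have : ((PySem.Set.ofList vals).flatMap
        (fun t => List.replicate ((vals.count t : Int)).toNat (some t))) = body := by
      rw [hbody]
      simp
    rw [this]
    have := fill_invariant body [] (by simp)
    simpa using this
  have hB : reorganize_plate_py_alt plate = body.take 8 ++ List.replicate (8 - body.length) none := by
    unfold reorganize_plate_py_alt
    rw [if_neg hne]
    simp only [order_eq_ofList, foldl_append_flatMap, List.nil_append]
    have hfil : ((PySem.Set.ofList vals).flatMap (fun t => plate.filter (fun s => s == some t))) = body := by
      rw [hbody]
      congr 1
      funext t
      exact filter_eq_replicate t plate
    rw [hfil, PySem.List.slice_to _ (by norm_num)]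
    norm_num
    congr 2
    have : (body.take 8).length = min 8 body.length := by simp
    omega
  rw [hA, hB]

-- ===== VERDICT (by name: the statement is the Claim_ definition above) =====
theorem reorganize_plate_py_spec : Claim_equal_reorganize_plate_py := by
  intro plate _
  unfold Spec_reorganize_plate_py
  by_cases h : plate = []
  · subst h; rfl
  · exact both_eq_normal plate h
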